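-- pv_equiv track=rewrite | github.com/Gihoon-Kim-Git/PPDS24F-Daily-Code | week07/3/minmax_division_kr.py | solution
-- ===== SOURCE A (Python) =====
-- def can_divide(A, K, max_sum):
--     current_sum = 0  # 현재 블록의 합
--     blocks = 1  # 첫 번째 블록부터 시작
--
--     # 배열의 각 원소를 순회하면서 블록을 형성합니다.
--     for num in A:
--         # 현재 블록에 num을 추가했을 때 max_sum을 초과하면 새로운 블록을 만듭니다.
--         if current_sum + num > max_sum:
--             blocks += 1  # 블록 수를 증가시킴
--             current_sum = num  # 새로운 블록의 첫 번째 원소로 시작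
--         else:
--             current_sum += num  # 현재 블록에 원소를 추가
--
--         # 블록 수가 K를 초과하면 False를 반환 (mid 값이 너무 작아서 나눌 수 없는 경우)
--         if blocks > K:
--             return False
--
--     # 주어진 max_sum으로 K개 이하의 블록으로 나눌 수 있으면 True 반환
--     return True
--
-- def solution(K, M, A):
--     # 이진 탐색의 초기 범위 설정
--     low = max(A)  # large sum의 최소값은 배열의 최대 원소값
--     high = sum(A)  # large sum의 최대값은 배열 전체의 합
--
--     # 이진 탐색 수행
--     while low <= high:
--         mid = (low + high) // 2  # 중간값(mid)을 large sum의 후보로 선택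
--
--         if can_divide(A, K, mid):
--             # mid 값으로 나눌 수 있다면 더 작은 large sum을 시도
--             high = mid - 1
--         else:
--             # mid 값으로 나눌 수 없다면 더 큰 large sum을 시도
--             low = mid + 1
--
--     # 이진 탐색이 종료되면 low 값이 최적의 large sum
--     return low
-- ===== SOURCE B (Python) =====
-- def solution(K, M, A):
--     # Recursive bisection on the answer; feasibility by computing the full
--     # greedy block count once and comparing it to K (no capped early-exit scan).
--     def blocks(cap):
--         used, acc = 1, 0
--         for a in A:
--             if acc + a > cap:
--                 used, acc = used + 1, a
--             else:
--                 acc += a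
--         return used
--
--     def search(lo, hi):
--         if lo > hi:
--             return lo
--         mid = (lo + hi) // 2
--         if blocks(mid) <= K:
--             return search(lo, mid - 1)
--         return search(mid + 1, hi)
--
--     return search(max(A), sum(A))
-- ===== Notes on version B (the rewrite author's own statement) =====
-- stated objective: alternative
-- what changed: Same answer-space bisection reproduced with a different decomposition: a recursive search function replacing the low/high-mutating while loop, and feasibility decided by computing the full greedy block count once and comparing it to K instead of A's capped scan with an early 'return False'.
import Mathlib
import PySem

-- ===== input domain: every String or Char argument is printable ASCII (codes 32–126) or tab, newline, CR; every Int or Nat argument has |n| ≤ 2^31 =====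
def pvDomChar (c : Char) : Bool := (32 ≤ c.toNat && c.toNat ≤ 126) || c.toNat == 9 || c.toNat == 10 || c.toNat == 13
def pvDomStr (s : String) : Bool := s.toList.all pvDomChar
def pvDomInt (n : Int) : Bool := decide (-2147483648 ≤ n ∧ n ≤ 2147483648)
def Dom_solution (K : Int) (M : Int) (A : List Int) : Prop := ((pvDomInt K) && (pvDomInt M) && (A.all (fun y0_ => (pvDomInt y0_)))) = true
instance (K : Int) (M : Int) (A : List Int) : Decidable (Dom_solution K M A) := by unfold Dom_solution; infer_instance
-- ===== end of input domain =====

-- B keeps A's bisection on the answer but with a different decomposition: a recursive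
-- search instead of the mutating while loop, and feasibility via the full greedy block
-- count compared to K instead of a capped scan with an early return.

-- ===== PORT A =====
-- can_divide's loop with its early 'return False' (blocks > K checked after each element)
def canDivideGo (K maxSum : Int) : List Int → Int → Int → Bool
  | [], _, _ => true
  | num :: rest, currentSum, blocks =>
    if currentSum + num > maxSum then
      if blocks + 1 > K then false else canDivideGo K maxSum rest num (blocks + 1)
    else
      if blocks > K then false else canDivideGo K maxSum rest (currentSum + num) blocks

def canDivide (A : List Int) (K : Int) (maxSum : Int) : Bool :=
  canDivideGo K maxSum A 0 1

-- the 'while low <= high' binary-search loop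
def bisectGo (A : List Int) (K : Int) (low high : Int) : Int :=
  if h : low ≤ high then
    let mid := PySem.Int.floordiv (low + high) 2
    if canDivide A K mid then bisectGo A K low (mid - 1) else bisectGo A K (mid + 1) high
  else low
termination_by (high + 1 - low).toNat
decreasing_by
  · have := PySem.Int.floordiv_two_mid_bounds h; omega
  · have := PySem.Int.floordiv_two_mid_bounds h; omega

def solution (K : Int) (M : Int) (A : List Int) : Int :=
  -- Pre_solution excludes A = [], where Python's max(A) raises ValueError
  let low := (PySem.List.max? A (fun y => y)).getD 0
  let high := A.sum
  bisectGo A K low high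

-- ===== PORT B =====
-- blocks(cap): the for-loop over A carrying (used, acc), no cap on the count
def altBlocksGo (cap : Int) : List Int → Int → Int → Int
  | [], used, _ => used
  | a :: t, used, acc =>
    if acc + a > cap then altBlocksGo cap t (used + 1) a
    else altBlocksGo cap t used (acc + a)

def altBlocks (A : List Int) (cap : Int) : Int := altBlocksGo cap A 1 0

-- search(lo, hi): the recursive bisection
def altSearch (A : List Int) (K lo hi : Int) : Int :=
  if h : lo > hi then lo
  else
    let mid := PySem.Int.floordiv (lo + hi) 2
    if altBlocks A mid ≤ K then altSearch A K lo (mid - 1) else altSearch A K (mid + 1) hi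
termination_by (hi + 1 - lo).toNat
decreasing_by
  · have := PySem.Int.floordiv_two_mid_bounds (le_of_not_gt h); omega
  · have := PySem.Int.floordiv_two_mid_bounds (le_of_not_gt h); omega

def solution_alt (K : Int) (M : Int) (A : List Int) : Int :=
  -- Pre_solution excludes A = [], where Python's max(A) raises ValueError
  altSearch A K ((PySem.List.max? A (fun y => y)).getD 0) A.sum

-- ===== PRECONDITION & SPEC =====
-- A (and B) raise ValueError on empty A (max of an empty sequence); everything else returns.
def Pre_solution (K : Int) (M : Int) (A : List Int) : Prop := A ≠ []
instance (K : Int) (M : Int) (A : List Int) : Decidable (Pre_solution K M A) := by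
  unfold Pre_solution; infer_instance

def pvWitness_solution : Int × Int × List Int := (2, 0, [1, 2, 3])

def Spec_solution (K : Int) (M : Int) (A : List Int) (out : Int) : Prop := out = solution_alt K M A
instance (K : Int) (M : Int) (A : List Int) (out : Int) : Decidable (Spec_solution K M A out) := by
  unfold Spec_solution; infer_instance

-- ===== CLAIM (what is proved, stated in full; the proofs are below) =====
def Claim_equal_solution : Prop := ∀ (K : Int) (M : Int) (A : List Int), Dom_solution K M A → Pre_solution K M A → Spec_solution K M A (solution K M A)

-- ===== LEMMAS AND PROOFS =====

-- the block counter never decreases below its start value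
theorem altBlocksGo_ge (cap : Int) (t : List Int) :
    ∀ u acc, u ≤ altBlocksGo cap t u acc := by
  induction t with
  | nil => intro u acc; simp [altBlocksGo]
  | cons a t ih =>
    intro u acc
    simp only [altBlocksGo]
    split_ifs with h1
    · have := ih (u + 1) a; omega
    · exact ih u (acc + a)

-- on a nonempty list, A's capped early-exit scan is exactly 'full count ≤ K'
theorem predicate_eq (K x : Int) (t : List Int) :
    ∀ cs b, t ≠ [] → canDivideGo K x t cs b = decide (altBlocksGo x t b cs ≤ K) := by
  induction t with
  | nil => intro cs b ht; exact absurd rfl ht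
  | cons num rest ih =>
    intro cs b _
    by_cases hr : rest = []
    · subst hr
      simp only [canDivideGo, altBlocksGo]
      split_ifs <;> simp_all
    · simp only [canDivideGo, altBlocksGo]
      split_ifs with hov hb1 hb2
      · have := altBlocksGo_ge x rest (b + 1) num
        symm; simp only [decide_eq_false_iff_not]; omega
      · exact ih num (b + 1) hr
      · have := altBlocksGo_ge x rest b (cs + num)
        symm; simp only [decide_eq_false_iff_not]; omega
      · exact ih (cs + num) b hr

-- the two bisections agree step by step
theorem search_eq (A : List Int) (K : Int) (hne : A ≠ []) :
    ∀ N : Nat, ∀ lo hi : Int, (hi + 1 - lo).toNat ≤ N →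
      altSearch A K lo hi = bisectGo A K lo hi := by
  intro N
  induction N with
  | zero =>
    intro lo hi hN
    have hgt : hi < lo := by omega
    rw [altSearch, bisectGo]
    rw [dif_pos (by omega : lo > hi), dif_neg (by omega : ¬ lo ≤ hi)]
  | succ N ih =>
    intro lo hi hN
    by_cases hlh : lo ≤ hi
    · have hm := PySem.Int.floordiv_two_mid_bounds hlh
      have heqA : bisectGo A K lo hi =
          (if canDivide A K (PySem.Int.floordiv (lo + hi) 2) then
            bisectGo A K lo (PySem.Int.floordiv (lo + hi) 2 - 1)
          else bisectGo A K (PySem.Int.floordiv (lo + hi) 2 + 1) hi) := by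
        rw [bisectGo]; simp [hlh]
      have heqB : altSearch A K lo hi =
          (if altBlocks A (PySem.Int.floordiv (lo + hi) 2) ≤ K then
            altSearch A K lo (PySem.Int.floordiv (lo + hi) 2 - 1)
          else altSearch A K (PySem.Int.floordiv (lo + hi) 2 + 1) hi) := by
        rw [altSearch]; simp [show ¬ lo > hi by omega]
      have hpred : canDivide A K (PySem.Int.floordiv (lo + hi) 2) =
          decide (altBlocks A (PySem.Int.floordiv (lo + hi) 2) ≤ K) :=
        predicate_eq K _ A 0 1 hne
      rw [heqA, heqB, hpred]
      simp only [decide_eq_true_eq]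
      split_ifs with hc
      · exact ih lo _ (by omega)
      · exact ih _ hi (by omega)
    · rw [altSearch, bisectGo]
      rw [dif_pos (by omega : lo > hi), dif_neg hlh]

-- ===== VERDICT (by name: the statement is the Claim_ definition above) =====
theorem solution_spec : Claim_equal_solution := by
  intro K M A hDom hPre
  unfold Spec_solution
  obtain ⟨mx, hmax⟩ : ∃ mx, PySem.List.max? A (fun y => y) = some mx := by
    cases hmx : PySem.List.max? A (fun y => y) with
    | none => exact absurd ((PySem.List.max?_eq_none_iff A _).mp hmx) hPre
    | some mx => exact ⟨mx, rfl⟩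
  simp only [solution, solution_alt, hmax, Option.getD_some]
  exact (search_eq A K hPre ((A.sum + 1 - mx).toNat) mx A.sum le_rfl).symm
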